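-- pv_equiv track=rewrite | github.com/RBVI/ChimeraX | src/hydra/molecule/mmcif.py | combine_quoted_values
-- ===== SOURCE A (Python) =====
-- def combine_quoted_values(values):
--   qvalues = []
--   in_quote = False
--   for e in values:
--     if in_quote:
--       if e.endswith(in_quote):
--         qv.append(e[:-1])
--         qvalues.append(' '.join(qv))
--         in_quote = False
--       else:
--         qv.append(e)
--     elif e.startswith("'") or e.startswith('"'):
--       q = e[0]
--       if e.endswith(q):
--         qvalues.append(e[1:-1])
--       else:
--         in_quote = q
--         qv = [e[1:]]
--     else:
--       qvalues.append(e)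
--   return qvalues
-- ===== SOURCE B (Python) =====
-- def combine_quoted_values(values):
--     qvalues = []
--     n = len(values)
--     i = 0
--     while i < n:
--         e = values[i]
--         if e.startswith(("'", '"')):
--             q = e[0]
--             if e.endswith(q):
--                 qvalues.append(e[1:-1])
--                 i += 1
--             else:
--                 parts = [e[1:]]
--                 j = i + 1
--                 while j < n and not values[j].endswith(q):
--                     parts.append(values[j])
--                     j += 1
--                 if j < n:
--                     parts.append(values[j][:-1])
--                     qvalues.append(' '.join(parts))
--                 i = j + 1
--         else:
--             qvalues.append(e)
--             i += 1
--     return qvalues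
-- ===== Notes on version B (the rewrite author's own statement) =====
-- stated objective: alternative
-- what changed: Replaced A's single-pass in_quote/qv flag state machine with an index-driven outer loop plus an inner lookahead scan that collects a quoted run up to its closing token in one step.
import Mathlib
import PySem

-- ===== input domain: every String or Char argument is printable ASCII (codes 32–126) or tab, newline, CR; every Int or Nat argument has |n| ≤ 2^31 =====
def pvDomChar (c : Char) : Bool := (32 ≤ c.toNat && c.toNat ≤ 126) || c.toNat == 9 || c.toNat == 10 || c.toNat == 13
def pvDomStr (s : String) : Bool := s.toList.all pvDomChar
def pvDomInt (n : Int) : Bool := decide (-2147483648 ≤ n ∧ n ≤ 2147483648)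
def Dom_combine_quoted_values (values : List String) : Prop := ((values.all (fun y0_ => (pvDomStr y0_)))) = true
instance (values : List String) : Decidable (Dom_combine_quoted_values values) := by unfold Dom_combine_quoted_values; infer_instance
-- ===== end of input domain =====

-- B replaces A's in_quote/qv flag state machine by an index-free recursion with an
-- explicit lookahead scan for the closing quote (objective: alternative, same cost).

-- ===== PORT A =====
-- loop state: (qvalues, in_quote : Option String, qv); in_quote holds the one-char quote string.
def pvStepA (st : List String × Option String × List String) (e : String) :
    List String × Option String × List String :=
  match st with
  | (qvalues, some q, qv) =>
    if PySem.Str.endswith e q then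
      (qvalues ++ [PySem.Str.join " " (qv ++ [PySem.Str.slice e none (some (-1))])], none, [])
    else (qvalues, some q, qv ++ [e])
  | (qvalues, none, qv) =>
    if PySem.Str.startswith e "'" || PySem.Str.startswith e "\"" then
      -- q = e[0]: e is nonempty under the guard, so e[0] (as a 1-char string) = e[:1]
      if PySem.Str.endswith e (PySem.Str.slice e none (some 1)) then
        (qvalues ++ [PySem.Str.slice e (some 1) (some (-1))], none, qv)
      else (qvalues, some (PySem.Str.slice e none (some 1)), [PySem.Str.slice e (some 1) none])
    else (qvalues ++ [e], none, qv)

def combine_quoted_values (values : List String) : List String :=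
  (values.foldl pvStepA ([], none, [])).1

-- ===== PORT B =====
-- inner while loop of B: scan forward for the first token ending with q; returns the
-- collected parts (last one with its trailing quote removed) and the remaining tokens.
def pvScanClose (q : String) : List String → Option (List String × List String)
  | [] => none
  | e :: t =>
    if PySem.Str.endswith e q then some ([PySem.Str.slice e none (some (-1))], t)
    else (pvScanClose q t).map (fun pr => (e :: pr.1, pr.2))

theorem pvScanClose_length {q : String} : ∀ {l ps rem : List String},
    pvScanClose q l = some (ps, rem) → rem.length < l.length := by
  intro l
  induction l with
  | nil => intro ps rem h; simp [pvScanClose] at h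
  | cons e t ih =>
    intro ps rem h
    simp only [pvScanClose] at h
    split at h
    · cases h; simp
    · cases hs : pvScanClose q t with
      | none => rw [hs] at h; simp at h
      | some pr =>
        rw [hs] at h
        simp at h
        have := ih (ps := pr.1) (rem := pr.2) (by rw [hs])
        obtain ⟨_, h2⟩ := h
        simp [← h2]; omega

def combine_quoted_values_alt (values : List String) : List String :=
  match values with
  | [] => []
  | e :: rest =>
    if PySem.Str.startswith e "'" || PySem.Str.startswith e "\"" then
      -- q = e[0] (e nonempty under the guard)
      if PySem.Str.endswith e (PySem.Str.slice e none (some 1)) then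
        PySem.Str.slice e (some 1) (some (-1)) :: combine_quoted_values_alt rest
      else
        match h : pvScanClose (PySem.Str.slice e none (some 1)) rest with
        | none => []   -- no closing quote: B's `if j < n` fails and i jumps past the end
        | some (ps, rem) =>
          PySem.Str.join " " (PySem.Str.slice e (some 1) none :: ps) :: combine_quoted_values_alt rem
    else e :: combine_quoted_values_alt rest
termination_by values.length
decreasing_by
  · simp
  · exact Nat.lt_trans (pvScanClose_length h) (by simp)
  · simp

-- ===== PRECONDITION & SPEC =====
def Spec_combine_quoted_values (values : List String) (out : List String) : Prop := out = combine_quoted_values_alt values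
instance (values : List String) (out : List String) : Decidable (Spec_combine_quoted_values values out) := by unfold Spec_combine_quoted_values; infer_instance

-- ===== CLAIM (what is proved, stated in full; the proofs are below) =====
def Claim_equal_combine_quoted_values : Prop := ∀ (values : List String), Dom_combine_quoted_values values → Spec_combine_quoted_values values (combine_quoted_values values)

-- ===== LEMMAS AND PROOFS =====

-- Simultaneous invariant: A's fold from the neutral state produces B's output, and
-- A's fold from an open-quote state produces what B's lookahead scan produces.
theorem pvFold_inv : ∀ (l : List String),
    (∀ acc qv, (l.foldl pvStepA (acc, none, qv)).1 = acc ++ combine_quoted_values_alt l) ∧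
    (∀ acc q qv, (l.foldl pvStepA (acc, some q, qv)).1 =
      acc ++ (match pvScanClose q l with
              | none => []
              | some (ps, rem) =>
                  PySem.Str.join " " (qv ++ ps) :: combine_quoted_values_alt rem)) := by
  intro l
  induction l with
  | nil => exact ⟨fun acc qv => by simp [combine_quoted_values_alt],
                  fun acc q qv => by simp [pvScanClose]⟩
  | cons e t ih =>
    obtain ⟨ihMain, ihAux⟩ := ih
    constructor
    · intro acc qv
      rw [combine_quoted_values_alt, List.foldl_cons]
      simp only [pvStepA]
      by_cases hs : (PySem.Str.startswith e "'" || PySem.Str.startswith e "\"") = true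
      · rw [if_pos hs, if_pos hs]
        by_cases he : PySem.Str.endswith e (PySem.Str.slice e none (some 1)) = true
        · rw [if_pos he, if_pos he, ihMain]
          simp
        · rw [if_neg he, if_neg he, ihAux]
          cases hsc : pvScanClose (PySem.Str.slice e none (some 1)) t with
          | none => simp only [hsc]
          | some pr => cases pr; simp only [hsc]; simp
      · rw [if_neg hs, if_neg hs, ihMain]
        simp
    · intro acc q qv
      rw [List.foldl_cons]
      simp only [pvStepA, pvScanClose]
      by_cases he : PySem.Str.endswith e q = true
      · rw [if_pos he, if_pos he, ihMain]
        simp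
      · rw [if_neg he, if_neg he, ihAux]
        cases hsc : pvScanClose q t with
        | none => simp only [hsc]; simp
        | some pr => cases pr; simp only [hsc]; simp

-- ===== VERDICT (by name: the statement is the Claim_ definition above) =====
theorem combine_quoted_values_spec : Claim_equal_combine_quoted_values := by
  intro values _
  unfold Spec_combine_quoted_values combine_quoted_values
  simpa using (pvFold_inv values).1 [] []
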